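-- pv_equiv track=rewrite | github.com/ikarius6/jacky | core/mixins/utils.py | match_words
-- ===== SOURCE A (Python) =====
-- def match_words(q_lower: str, word_set: set) -> bool:
--     """Return True if *q_lower* matches any word/phrase in *word_set*.
--
--     Single-word entries are matched against individual tokens; multi-word
--     phrases are matched as substrings of the cleaned input.
--     """
--     tokens = [tk.strip(".,;:!?¿¡\"'()") for tk in q_lower.split()]
--     q_clean = " ".join(tokens)
--     for w in word_set:
--         if " " in w:
--             if w in q_clean:
--                 return True
--         else:
--             if w in tokens:
--                 return True
--     return False
-- ===== SOURCE B (Python) =====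
-- def match_words(q_lower: str, word_set: set) -> bool:
--     """Invert A's single-word loop: scan the TOKENS and look each one up in
--     word_set directly (tokens are whitespace-free, so they can only ever equal
--     single-word entries); then one scan of word_set for phrase substring hits."""
--     tokens = [tk.strip(".,;:!?¿¡\"'()") for tk in q_lower.split()]
--     if any(tk in word_set for tk in tokens):
--         return True
--     q_clean = " ".join(tokens)
--     return any(" " in w and w in q_clean for w in word_set)
-- ===== Notes on version B (the rewrite author's own statement) =====
-- stated objective: alternative
-- what changed: A scans word_set once, testing each entry against the token list (membership scan) or q_clean; B inverts the single-word check: it scans the tokens and looks each token up in word_set directly (correct because split() tokens are whitespace-free and so can only equal single-word entries), then does one phrase substring pass over word_set.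
import Mathlib
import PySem

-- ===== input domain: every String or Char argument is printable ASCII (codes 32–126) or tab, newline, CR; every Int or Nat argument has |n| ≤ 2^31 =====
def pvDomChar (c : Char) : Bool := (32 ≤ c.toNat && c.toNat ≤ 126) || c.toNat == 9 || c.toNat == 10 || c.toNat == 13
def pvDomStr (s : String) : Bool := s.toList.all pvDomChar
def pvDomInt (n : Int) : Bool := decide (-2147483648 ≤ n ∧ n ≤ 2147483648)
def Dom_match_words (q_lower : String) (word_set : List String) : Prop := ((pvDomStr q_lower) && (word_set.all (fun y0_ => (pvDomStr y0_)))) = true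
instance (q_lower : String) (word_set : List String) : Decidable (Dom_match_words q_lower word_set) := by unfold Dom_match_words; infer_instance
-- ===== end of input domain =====

-- B inverts A's single-word loop: it scans the tokens and looks each one up in word_set
-- (valid because split() tokens are whitespace-free), instead of scanning word_set against the token list.

-- ===== PORT A =====
def mwPunct : String := ".,;:!?¿¡\"'()"

-- A's 'for w in word_set: … return True' loop (early return = recursion stops at true)
def matchWordsLoop (tokens : List String) (q_clean : String) : List String → Bool
  | [] => false
  | w :: ws =>
    if PySem.Str.isIn " " w then
      if PySem.Str.isIn w q_clean then true else matchWordsLoop tokens q_clean ws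
    else
      if tokens.contains w then true else matchWordsLoop tokens q_clean ws

def match_words (q_lower : String) (word_set : List String) : Bool :=
  let tokens := (PySem.Str.split₀ q_lower).map (fun tk => PySem.Str.stripChars tk mwPunct)
  let q_clean := PySem.Str.join " " tokens
  matchWordsLoop tokens q_clean word_set

-- ===== PORT B =====
def match_words_alt (q_lower : String) (word_set : List String) : Bool :=
  let tokens := (PySem.Str.split₀ q_lower).map (fun tk => PySem.Str.stripChars tk mwPunct)
  -- 'any(tk in word_set for tk in tokens)': scan the tokens, look each up in the set
  if tokens.any (fun tk => word_set.contains tk) then true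
  else
    let q_clean := PySem.Str.join " " tokens
    word_set.any (fun w => PySem.Str.isIn " " w && PySem.Str.isIn w q_clean)

-- ===== PRECONDITION & SPEC =====
def Spec_match_words (q_lower : String) (word_set : List String) (out : Bool) : Prop := out = match_words_alt q_lower word_set
instance (q_lower : String) (word_set : List String) (out : Bool) : Decidable (Spec_match_words q_lower word_set out) := by unfold Spec_match_words; infer_instance

-- ===== CLAIM (what is proved, stated in full; the proofs are below) =====
def Claim_equal_match_words : Prop := ∀ (q_lower : String) (word_set : List String), Dom_match_words q_lower word_set → Spec_match_words q_lower word_set (match_words q_lower word_set)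

-- ===== LEMMAS AND PROOFS =====

-- A's loop is an 'any' over word_set
theorem matchWordsLoop_eq_any (tokens : List String) (q_clean : String) (ws : List String) :
    matchWordsLoop tokens q_clean ws
      = ws.any (fun w => if PySem.Str.isIn " " w then PySem.Str.isIn w q_clean else tokens.contains w) := by
  induction ws with
  | nil => rfl
  | cons w ws ih =>
    simp only [matchWordsLoop, List.any_cons, ih]
    cases hb : PySem.Str.isIn " " w <;> simp

-- every word produced by split() consists of non-whitespace characters
theorem split₀_go_no_space (s : List Char) : ∀ (cur : List Char) (acc : List (List Char)),
    (∀ c ∈ cur, PySem.Chars.isspace c = false) →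
    (∀ t ∈ acc, ∀ c ∈ t, PySem.Chars.isspace c = false) →
    ∀ t ∈ PySem.Chars.split₀.go s cur acc, ∀ c ∈ t, PySem.Chars.isspace c = false := by
  induction s with
  | nil =>
    intro cur acc hcur hacc t ht
    unfold PySem.Chars.split₀.go at ht
    split at ht
    · exact hacc t (by simpa using ht)
    · rcases (by simpa using ht : t ∈ acc ∨ t = cur.reverse) with h | rfl
      · exact hacc t h
      · intro c hc; exact hcur c (by simpa using hc)
  | cons a s ih =>
    intro cur acc hcur hacc t ht
    unfold PySem.Chars.split₀.go at ht
    by_cases ha : PySem.Chars.isspace a = true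
    · rw [if_pos ha] at ht
      split at ht
      · exact ih [] acc (by simp) hacc t ht
      · refine ih [] (cur.reverse :: acc) (by simp) ?_ t ht
        intro u hu
        rcases List.mem_cons.mp hu with rfl | hu
        · intro c hc; exact hcur c (by simpa using hc)
        · exact hacc u hu
    · rw [if_neg ha] at ht
      refine ih (a :: cur) acc ?_ hacc t ht
      intro c hc
      rcases List.mem_cons.mp hc with rfl | hc
      · simpa using ha
      · exact hcur c hc

-- stripChars only removes characters
theorem stripChars_sublist (s chars : List Char) :
    List.Sublist (PySem.Chars.stripChars s chars) s := by
  unfold PySem.Chars.stripChars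
  have h1 : List.Sublist (List.dropWhile (fun c => chars.contains c) s) s :=
    List.dropWhile_sublist _
  have h2 : List.Sublist
      (List.dropWhile (fun c => chars.contains c)
        (List.dropWhile (fun c => chars.contains c) s).reverse)
      (List.dropWhile (fun c => chars.contains c) s).reverse :=
    List.dropWhile_sublist _
  have h3 := h2.reverse
  rw [List.reverse_reverse] at h3
  exact h3.trans h1

-- no token of the cleaned token list contains a space
theorem tokens_no_space (q : String) (t : String)
    (ht : t ∈ (PySem.Str.split₀ q).map (fun tk => PySem.Str.stripChars tk mwPunct)) :
    ' ' ∉ t.toList := by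
  rcases List.mem_map.mp ht with ⟨u, hu, rfl⟩
  rcases List.mem_map.mp (by simpa [PySem.Str.split₀] using hu) with ⟨v, hv, rfl⟩
  intro hmem
  have hsub : List.Sublist (PySem.Str.stripChars (String.ofList v) mwPunct).toList v := by
    have := stripChars_sublist (String.ofList v).toList mwPunct.toList
    simpa [PySem.Str.toList_stripChars] using this
  have hns := split₀_go_no_space q.toList [] [] (by simp) (by simp) v hv ' '
    (hsub.mem hmem)
  simp [PySem.Chars.isspace] at hns

-- ===== VERDICT (by name: the statement is the Claim_ definition above) =====
theorem match_words_spec : Claim_equal_match_words := by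
  intro q ws _
  unfold Spec_match_words match_words match_words_alt
  simp only [matchWordsLoop_eq_any]
  set tokens := (PySem.Str.split₀ q).map (fun tk => PySem.Str.stripChars tk mwPunct) with htok
  set qc := PySem.Str.join " " tokens with hqc
  have hns : ∀ t ∈ tokens, PySem.Str.isIn " " t = false := by
    intro t ht
    rcases hb : PySem.Str.isIn " " t with _ | _
    · rfl
    · exfalso
      apply tokens_no_space q t ht
      have := (PySem.Str.isIn_iff_infix " " t).mp hb
      exact (List.singleton_infix_iff ' ' t.toList).mp (by simpa using this)
  by_cases h : ∃ t ∈ tokens, t ∈ ws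
  · obtain ⟨t, ht, htw⟩ := h
    have h1 : tokens.any (fun tk => ws.contains tk) = true := by
      simp only [List.any_eq_true]
      exact ⟨t, ht, (List.contains_iff_mem).mpr htw⟩
    rw [if_pos h1]
    simp only [List.any_eq_true]
    refine ⟨t, htw, ?_⟩
    rw [hns t ht]
    simp only [Bool.false_eq_true, if_false]
    exact (List.contains_iff_mem).mpr ht
  · have h1 : tokens.any (fun tk => ws.contains tk) = false := by
      rw [List.any_eq_false]
      intro t ht
      rcases hc : ws.contains t with _ | _
      · simp
      · exact absurd ⟨t, ht, (List.contains_iff_mem).mp hc⟩ h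
    rw [if_neg (by rw [h1]; simp)]
    rw [Bool.eq_iff_iff]
    simp only [List.any_eq_true, Bool.and_eq_true]
    constructor
    · rintro ⟨w, hw, hcond⟩
      cases hb : PySem.Str.isIn " " w
      · rw [hb] at hcond
        simp only [Bool.false_eq_true, if_false] at hcond
        exact absurd ⟨w, (List.contains_iff_mem).mp hcond, hw⟩ h
      · rw [hb] at hcond
        simp only [if_true] at hcond
        exact ⟨w, hw, hb, hcond⟩
    · rintro ⟨w, hw, hsp, hsub⟩
      refine ⟨w, hw, ?_⟩
      rw [hsp]
      simpa using hsub
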